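-- pv_equiv track=rewrite | github.com/Dreats17/Blackjack | tools/autoplay/policies/event_policy.py | _pick_safe_option
-- ===== SOURCE A (Python) =====
-- def _pick_safe_option(options, normalized, reason_prefix="avoid_violence"):
--     """When a dangerous option is present, pick the safest alternative."""
--     safe_keywords = [
--         "comply", "leave", "walk", "hide", "surrender", "run", "back away",
--         "apologize", "calm", "talk", "pay", "beg", "observe", "watch", "wait",
--     ]
--     for safe_kw in safe_keywords:
--         for i, opt in enumerate(normalized):
--             if safe_kw in opt:
--                 return i, f"{reason_prefix}_pick_{safe_kw}"
--     return 0, f"{reason_prefix}_first_option"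
-- ===== SOURCE B (Python) =====
-- def _pick_safe_option(options, normalized, reason_prefix="avoid_violence"):
--     """Single option-major pass: score each option by the index of the first
--     safe keyword it contains, keep the running minimum (strictly smaller wins,
--     so ties keep the earliest option)."""
--     safe_keywords = [
--         "comply", "leave", "walk", "hide", "surrender", "run", "back away",
--         "apologize", "calm", "talk", "pay", "beg", "observe", "watch", "wait",
--     ]
--     best = None  # (priority, index)
--     for i, opt in enumerate(normalized):
--         p = None
--         for j, kw in enumerate(safe_keywords):
--             if kw in opt:
--                 p = j
--                 break
--         if p is not None and (best is None or p < best[0]):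
--             best = (p, i)
--     if best is None:
--         return 0, f"{reason_prefix}_first_option"
--     return best[1], f"{reason_prefix}_pick_{safe_keywords[best[0]]}"
-- ===== Notes on version B (the rewrite author's own statement) =====
-- stated objective: alternative
-- what changed: Replaced the keyword-major nested early-return scan with a single option-major pass that scores each option by the index of its first contained safe keyword and keeps a strict running minimum (priority, index).
import Mathlib
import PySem

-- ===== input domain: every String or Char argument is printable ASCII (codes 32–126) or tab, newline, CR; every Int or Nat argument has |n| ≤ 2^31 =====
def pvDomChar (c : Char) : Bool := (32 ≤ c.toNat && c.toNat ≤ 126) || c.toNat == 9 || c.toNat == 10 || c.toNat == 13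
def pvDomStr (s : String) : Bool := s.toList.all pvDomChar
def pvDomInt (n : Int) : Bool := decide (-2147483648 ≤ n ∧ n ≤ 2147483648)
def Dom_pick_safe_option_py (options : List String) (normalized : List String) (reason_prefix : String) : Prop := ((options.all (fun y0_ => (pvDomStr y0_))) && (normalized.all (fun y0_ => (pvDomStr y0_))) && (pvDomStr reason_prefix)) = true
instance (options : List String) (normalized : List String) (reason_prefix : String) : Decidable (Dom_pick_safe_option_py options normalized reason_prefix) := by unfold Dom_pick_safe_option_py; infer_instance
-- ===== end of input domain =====

-- B replaces A's keyword-major nested early-return scan by one option-major pass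
-- keeping a running minimum (priority, index); same return value, proved equal (objective: alternative).


-- ===== PORT A =====
def pvSafeKeywords : List String :=
  ["comply", "leave", "walk", "hide", "surrender", "run", "back away",
   "apologize", "calm", "talk", "pay", "beg", "observe", "watch", "wait"]

-- inner loop of A: first index i (counting from the given i) of an option containing kw
def pvInnerA (kw : String) (normalized : List String) (i : Nat) : Option Nat :=
  match normalized with
  | [] => none
  | opt :: rest => if PySem.Str.isIn kw opt then some i else pvInnerA kw rest (i + 1)

-- outer loop of A over the keyword list, early return on the first keyword with a match
def pvOuterA (normalized : List String) (reason_prefix : String) : List String → Int × String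
  | [] => (0, reason_prefix ++ "_first_option")
  | kw :: rest =>
    match pvInnerA kw normalized 0 with
    | some i => ((i : Int), reason_prefix ++ "_pick_" ++ kw)
    | none => pvOuterA normalized reason_prefix rest

def pick_safe_option_py (options : List String) (normalized : List String) (reason_prefix : String) : Int × String :=
  pvOuterA normalized reason_prefix pvSafeKeywords

-- ===== PORT B =====
-- priority of an option: index of the first keyword it contains (none if no keyword matches)
def pvPrio (opt : String) : List String → Option Nat
  | [] => none
  | kw :: rest => if PySem.Str.isIn kw opt then some 0 else (pvPrio opt rest).map (· + 1)

-- single option-major pass keeping the running minimum (priority, index), strict update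
def pvBestLoop (kws : List String) (normalized : List String) (i : Nat)
    (best : Option (Nat × Nat)) : Option (Nat × Nat) :=
  match normalized with
  | [] => best
  | opt :: rest =>
    let best' :=
      match pvPrio opt kws, best with
      | none, _ => best
      | some p, none => some (p, i)
      | some p, some (bp, bi) => if p < bp then some (p, i) else some (bp, bi)
    pvBestLoop kws rest (i + 1) best'

def pvRender (kws : List String) (reason_prefix : String) : Option (Nat × Nat) → Int × String
  | none => (0, reason_prefix ++ "_first_option")
  | some (p, i) => ((i : Int), reason_prefix ++ "_pick_" ++ kws.getD p "")

def pick_safe_option_py_alt (options : List String) (normalized : List String) (reason_prefix : String) : Int × String :=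
  pvRender pvSafeKeywords reason_prefix (pvBestLoop pvSafeKeywords normalized 0 none)

-- ===== PRECONDITION & SPEC =====
def Spec_pick_safe_option_py (options : List String) (normalized : List String) (reason_prefix : String) (out : Int × String) : Prop := out = pick_safe_option_py_alt options normalized reason_prefix
instance (options : List String) (normalized : List String) (reason_prefix : String) (out : Int × String) : Decidable (Spec_pick_safe_option_py options normalized reason_prefix out) := by unfold Spec_pick_safe_option_py; infer_instance

-- ===== CLAIM (what is proved, stated in full; the proofs are below) =====
def Claim_equal_pick_safe_option_py : Prop := ∀ (options : List String) (normalized : List String) (reason_prefix : String), Dom_pick_safe_option_py options normalized reason_prefix → Spec_pick_safe_option_py options normalized reason_prefix (pick_safe_option_py options normalized reason_prefix)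

-- ===== LEMMAS AND PROOFS =====

-- once the minimum priority 0 is reached, the running best never changes
theorem pvBestLoop_freeze (kws : List String) (normalized : List String) (i j : Nat) :
    pvBestLoop kws normalized i (some (0, j)) = some (0, j) := by
  induction normalized generalizing i with
  | nil => rfl
  | cons opt rest ih =>
    simp only [pvBestLoop]
    cases pvPrio opt kws with
    | none => exact ih (i + 1)
    | some p => simp only [Nat.not_lt_zero, if_false]; exact ih (i + 1)

-- with an empty keyword list every priority is none, so the best never changes
theorem pvBestLoop_nil (normalized : List String) (i : Nat) (best : Option (Nat × Nat)) :
    pvBestLoop [] normalized i best = best := by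
  induction normalized generalizing i with
  | nil => rfl
  | cons opt rest ih => simpa [pvBestLoop, pvPrio] using ih (i + 1)

-- if the keyword kw matches somewhere (pvInnerA finds index j) and the incoming best has
-- priority ≥ 1 (or is none), the option-major pass over kw :: kws settles on (0, j)
theorem pvBestLoop_match (kw : String) (kws : List String) (normalized : List String)
    (i j : Nat) (best : Option (Nat × Nat))
    (hbest : best = none ∨ ∃ bp bi, best = some (bp, bi) ∧ 1 ≤ bp)
    (hfind : pvInnerA kw normalized i = some j) :
    pvBestLoop (kw :: kws) normalized i best = some (0, j) := by
  induction normalized generalizing i best with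
  | nil => simp [pvInnerA] at hfind
  | cons opt rest ih =>
    simp only [pvInnerA] at hfind
    simp only [pvBestLoop, pvPrio]
    by_cases hin : PySem.Str.isIn kw opt = true
    · rw [if_pos hin] at hfind
      rw [if_pos hin]
      obtain rfl : i = j := by exact Option.some.inj hfind
      rcases hbest with rfl | ⟨bp, bi, rfl, hbp⟩
      · exact pvBestLoop_freeze _ _ _ _
      · show pvBestLoop (kw :: kws) rest (i + 1)
            (if 0 < bp then some (0, i) else some (bp, bi)) = some (0, i)
        rw [if_pos (by omega : 0 < bp)]
        exact pvBestLoop_freeze _ _ _ _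
    · rw [if_neg hin] at hfind
      rw [if_neg hin]
      refine ih _ _ ?_ hfind
      cases hp : (pvPrio opt kws).map (· + 1) with
      | none => simpa [hp] using hbest
      | some q =>
        rcases Option.map_eq_some_iff.mp hp with ⟨q', _, rfl⟩
        rcases hbest with rfl | ⟨bp, bi, rfl, hbp⟩
        · exact Or.inr ⟨q' + 1, i, rfl, by omega⟩
        · simp only [hp]
          split
          · exact Or.inr ⟨q' + 1, i, rfl, by omega⟩
          · exact Or.inr ⟨bp, bi, rfl, hbp⟩

-- shift of a best-so-far state by one keyword
def pvShift : Option (Nat × Nat) → Option (Nat × Nat)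
  | none => none
  | some (p, i) => some (p + 1, i)

-- if kw matches nowhere, scanning with kw :: kws is the kws-scan with all priorities shifted
theorem pvBestLoop_nomatch (kw : String) (kws : List String) (normalized : List String)
    (i : Nat) (best : Option (Nat × Nat))
    (hfind : pvInnerA kw normalized i = none) :
    pvBestLoop (kw :: kws) normalized i (pvShift best) =
      pvShift (pvBestLoop kws normalized i best) := by
  induction normalized generalizing i best with
  | nil => rfl
  | cons opt rest ih =>
    simp only [pvInnerA] at hfind
    by_cases hin : PySem.Str.isIn kw opt = true
    · rw [if_pos hin] at hfind; exact absurd hfind (by simp)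
    · rw [if_neg hin] at hfind
      simp only [pvBestLoop, pvPrio]
      rw [if_neg hin]
      cases hp : pvPrio opt kws with
      | none => simpa [hp] using ih _ best hfind
      | some p =>
        rcases best with _ | ⟨bp, bi⟩
        · simpa [hp, pvShift] using ih _ (some (p, i)) hfind
        · simp only [hp, pvShift, Option.map_some, Nat.add_lt_add_iff_right]
          by_cases hlt : p < bp
          · rw [if_pos hlt, if_pos hlt]
            simpa [pvShift] using ih _ (some (p, i)) hfind
          · rw [if_neg hlt, if_neg hlt]
            simpa [pvShift] using ih _ (some (bp, bi)) hfind

-- main bridge: A's outer loop over any keyword suffix equals rendering B's scan over it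
theorem pvOuterA_eq_render (normalized : List String) (reason_prefix : String)
    (kws : List String) :
    pvOuterA normalized reason_prefix kws =
      pvRender kws reason_prefix (pvBestLoop kws normalized 0 none) := by
  induction kws with
  | nil => simp [pvOuterA, pvBestLoop_nil, pvRender]
  | cons kw rest ih =>
    simp only [pvOuterA]
    cases hfind : pvInnerA kw normalized 0 with
    | some j =>
      rw [pvBestLoop_match kw rest normalized 0 j none (Or.inl rfl) hfind]
      simp [pvRender]
    | none =>
      have h := pvBestLoop_nomatch kw rest normalized 0 none hfind
      simp only [pvShift] at h
      rw [h, ih]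
      cases pvBestLoop rest normalized 0 none with
      | none => rfl
      | some pi => rcases pi with ⟨p, i⟩; simp [pvShift, pvRender]

-- ===== VERDICT (by name: the statement is the Claim_ definition above) =====
theorem pick_safe_option_py_spec : Claim_equal_pick_safe_option_py := by
  intro options normalized reason_prefix _
  unfold Spec_pick_safe_option_py pick_safe_option_py pick_safe_option_py_alt
  exact pvOuterA_eq_render normalized reason_prefix pvSafeKeywords
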